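-- pv_equiv track=rewrite | github.com/anweshknayak/qutebrowser | qutebrowser/browser/hints.py | _number_to_hint_str
-- ===== SOURCE A (Python) =====
-- def _number_to_hint_str(number, chars, digits=0):
--     """Convert a number like "8" into a hint string like "JK".
--
--     This is used to sequentially generate all of the hint text.
--     The hint string will be "padded with zeroes" to ensure its length is >=
--     digits.
--
--     Inspired by Vimium.
--
--     Args:
--         number: The hint number.
--         chars: The charset to use.
--         digits: The minimum output length.
--
--     Return:
--         A hint string.
--     """
--     base = len(chars)
--     hintstr = []
--     remainder = 0
--     while True:
--         remainder = number % base
--         hintstr.insert(0, chars[remainder])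
--         number -= remainder
--         number //= base
--         if number <= 0:
--             break
--     # Pad the hint string we're returning so that it matches digits.
--     for _ in range(0, digits - len(hintstr)):
--         hintstr.insert(0, chars[0])
--     return ''.join(hintstr)
-- ===== SOURCE B (Python) =====
-- def _number_to_hint_str(number, chars, digits=0):
--     """Convert a number into a base-len(chars) hint string, padded to >= digits."""
--     base = len(chars)
--     # first compute the output length: count the digits of number, then pad up
--     d = 1
--     n = number
--     while n >= base:
--         n //= base
--         d += 1
--     length = max(d, digits)
--     # padding prefix, then the d digits most-significant-first
--     out = [chars[0]] * (length - d)
--     pw = base ** (d - 1)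
--     for _ in range(d):
--         out.append(chars[(number // pw) % base])
--         pw //= base
--     return ''.join(out)
-- ===== Notes on version B (the rewrite author's own statement) =====
-- stated objective: faster
-- what changed: Instead of accumulating digits LSB-first with insert(0,...) and a second insert-at-front padding loop (each insert shifts the whole list), B first computes the output length (digit count d, then max with digits), emits the padding prefix directly, and fills the d digits in one MSB-first positional pass chars[(number // pw) % base] with pw stepping down from base**(d-1), using only appends.
import Mathlib
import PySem

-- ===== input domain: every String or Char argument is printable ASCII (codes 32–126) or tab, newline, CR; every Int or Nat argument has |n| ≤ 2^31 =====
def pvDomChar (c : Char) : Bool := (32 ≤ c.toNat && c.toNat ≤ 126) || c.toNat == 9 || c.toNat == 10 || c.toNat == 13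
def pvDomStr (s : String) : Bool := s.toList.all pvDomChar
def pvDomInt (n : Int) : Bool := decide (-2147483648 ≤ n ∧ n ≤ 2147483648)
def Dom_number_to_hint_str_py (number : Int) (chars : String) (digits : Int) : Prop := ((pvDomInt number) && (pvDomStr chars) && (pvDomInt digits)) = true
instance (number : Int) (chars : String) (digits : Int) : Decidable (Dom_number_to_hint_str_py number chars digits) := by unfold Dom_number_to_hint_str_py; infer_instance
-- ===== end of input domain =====

-- B replaces A's two insert-at-front loops (LSB digit loop + padding loop) by computing the
-- output length first, emitting the padding prefix, and filling the digits MSB-first.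


-- ===== PORT A =====
-- A's while-True loop: remainder = number % base; hintstr.insert(0, chars[remainder]);
-- number -= remainder; number //= base; break when number <= 0.
-- The disjunct 'base ≤ 1' in the stopping guard is ONLY a termination guard: under
-- Pre_ it never fires on a recursive call (for base = 1 the first guard already stops,
-- and for base = 1, number > 0 — outside Pre_ — the Python loops forever).
def pvLoopA (cl : List Char) (base : Int) (number : Int) (acc : List Char) : List Char :=
  if _h : PySem.Int.floordiv (number - PySem.Int.mod number base) base ≤ 0 ∨ base ≤ 1 then
    PySem.List.pyGetD cl (PySem.Int.mod number base) ' ' :: acc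
  else
    pvLoopA cl base (PySem.Int.floordiv (number - PySem.Int.mod number base) base)
      (PySem.List.pyGetD cl (PySem.Int.mod number base) ' ' :: acc)
termination_by number.toNat
decreasing_by
  rw [not_or, not_le, not_le] at _h
  obtain ⟨h1, h2⟩ := _h
  have hb : 0 < base := by omega
  have hr0 : 0 ≤ PySem.Int.mod number base := PySem.Int.mod_nonneg number hb
  have hdvd : base ∣ (number - PySem.Int.mod number base) := by
    rw [PySem.Int.mod_eq_emod_of_pos hb, Int.emod_def]
    exact ⟨number / base, by ring⟩
  have hmod0 : PySem.Int.mod (number - PySem.Int.mod number base) base = 0 :=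
    (PySem.Int.mod_eq_zero_iff_dvd _ _).mpr hdvd
  have heq := PySem.Int.floordiv_mul_add_mod (number - PySem.Int.mod number base) base
  rw [hmod0, add_zero] at heq
  have h2q : PySem.Int.floordiv (number - PySem.Int.mod number base) base * 2 ≤
      PySem.Int.floordiv (number - PySem.Int.mod number base) base * base :=
    mul_le_mul_of_nonneg_left h2 (by omega)
  rw [heq] at h2q
  omega

def number_to_hint_str_py (number : Int) (chars : String) (digits : Int) : String :=
  let base : Int := PySem.Str.len chars
  let hintstr := pvLoopA chars.toList base number []
  -- for _ in range(0, digits - len(hintstr)): hintstr.insert(0, chars[0])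
  let padded := (PySem.List.pyRange 0 (digits - (hintstr.length : Int)) 1).foldl
      (fun acc _ => PySem.List.pyGetD chars.toList 0 ' ' :: acc) hintstr
  String.mk padded

-- ===== PORT B =====
-- first loop of B: d = 1; n = number; while n >= base: n //= base; d += 1.
-- 'base ≤ 1' in the stopping guard is only a termination guard (under Pre_ it fires
-- only when the first guard also fires; Source B diverges/raises outside Pre_).
def pvCountB (base : Int) (n : Int) (d : Int) : Int :=
  if h : n < base ∨ base ≤ 1 then d
  else pvCountB base (PySem.Int.floordiv n base) (d + 1)
termination_by n.toNat
decreasing_by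
  rw [not_or, not_lt, not_le] at h
  obtain ⟨h1, h2⟩ := h
  have hb : 0 < base := by omega
  have hr0 : 0 ≤ PySem.Int.mod n base := PySem.Int.mod_nonneg n hb
  have heq := PySem.Int.floordiv_mul_add_mod n base
  have hq1 : 1 ≤ PySem.Int.floordiv n base := by
    rw [PySem.Int.le_floordiv_iff_mul_le hb]; omega
  have h2q : PySem.Int.floordiv n base * 2 ≤ PySem.Int.floordiv n base * base :=
    mul_le_mul_of_nonneg_left h2 (by omega)
  omega

-- body of B's fill loop: out.append(chars[(number // pw) % base]); pw //= base
def pvFillStep (cl : List Char) (base : Int) (number : Int) (st : Int × List Char)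
    (_i : Int) : Int × List Char :=
  (PySem.Int.floordiv st.1 base,
   st.2 ++ [PySem.List.pyGetD cl (PySem.Int.mod (PySem.Int.floordiv number st.1) base) ' '])

def number_to_hint_str_py_alt (number : Int) (chars : String) (digits : Int) : String :=
  let base : Int := PySem.Str.len chars
  let d := pvCountB base number 1
  let length := max d digits
  -- out = [chars[0]] * (length - d)
  let out := List.replicate (length - d).toNat (PySem.List.pyGetD chars.toList 0 ' ')
  -- pw = base ** (d - 1); for _ in range(d): append; pw //= base
  let res := (PySem.List.pyRange 0 d 1).foldl (pvFillStep chars.toList base number)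
    (base ^ (d - 1).toNat, out)
  String.mk res.2

-- ===== PRECONDITION & SPEC =====
-- Pre_ is exactly the inputs on which A returns: it excludes the empty charset (A raises
-- ZeroDivisionError) and single-character charsets with number ≥ 1 (A's '//= base' never
-- shrinks number there and the Python while-loop never terminates).
def Pre_number_to_hint_str_py (number : Int) (chars : String) (digits : Int) : Prop :=
  1 ≤ PySem.Str.len chars ∧ (2 ≤ PySem.Str.len chars ∨ number ≤ 0)

instance (number : Int) (chars : String) (digits : Int) : Decidable (Pre_number_to_hint_str_py number chars digits) := by unfold Pre_number_to_hint_str_py; infer_instance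

def pvWitness_number_to_hint_str_py : Int × String × Int := (8, "ab", 2)

def Spec_number_to_hint_str_py (number : Int) (chars : String) (digits : Int) (out : String) : Prop := out = number_to_hint_str_py_alt number chars digits
instance (number : Int) (chars : String) (digits : Int) (out : String) : Decidable (Spec_number_to_hint_str_py number chars digits out) := by unfold Spec_number_to_hint_str_py; infer_instance

-- ===== CLAIM (what is proved, stated in full; the proofs are below) =====
def Claim_equal_number_to_hint_str_py : Prop := ∀ (number : Int) (chars : String) (digits : Int), Dom_number_to_hint_str_py number chars digits → Pre_number_to_hint_str_py number chars digits → Spec_number_to_hint_str_py number chars digits (number_to_hint_str_py number chars digits)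

-- ===== LEMMAS AND PROOFS =====

-- the digit character at (LSB) exponent e, shared description of both ports' output
def pvG (cl : List Char) (base N : Int) (e : Nat) : Char :=
  PySem.List.pyGetD cl (PySem.Int.mod (PySem.Int.floordiv N (base ^ e)) base) ' '

theorem pv_sub_mod_div (base N : Int) (hb : 0 < base) :
    PySem.Int.floordiv (N - PySem.Int.mod N base) base = PySem.Int.floordiv N base := by
  rw [PySem.Int.mod_eq_emod_of_pos hb, PySem.Int.floordiv_eq_ediv_of_pos hb,
    PySem.Int.floordiv_eq_ediv_of_pos hb]
  have h : N - (N % base) = base * (N / base) := by rw [Int.emod_def]; ring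
  rw [h, Int.mul_ediv_cancel_left _ (ne_of_gt hb)]

theorem pv_div_pow (base N : Int) (e : Nat) (hb : 0 < base) :
    PySem.Int.floordiv (PySem.Int.floordiv N base) (base ^ e) =
      PySem.Int.floordiv N (base ^ (e + 1)) := by
  rw [PySem.Int.floordiv_eq_ediv_of_pos hb, PySem.Int.floordiv_eq_ediv_of_pos (pow_pos hb e),
    PySem.Int.floordiv_eq_ediv_of_pos (pow_pos hb (e + 1)),
    Int.ediv_ediv_of_nonneg (le_of_lt hb), ← pow_succ']

theorem pv_floordiv_one (N : Int) : PySem.Int.floordiv N 1 = N := by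
  rw [PySem.Int.floordiv_eq_ediv_of_pos (by norm_num), Int.ediv_one]

theorem pvCountB_succ (base n d : Int) : pvCountB base n (d + 1) = pvCountB base n d + 1 := by
  fun_induction pvCountB base n d with
  | case1 n d h =>
    rw [pvCountB.eq_def, dif_pos h]
  | case2 n d h ih =>
    rw [pvCountB.eq_def, dif_neg h, ih]

theorem pvCountB_ge (base n d : Int) : d ≤ pvCountB base n d := by
  fun_induction pvCountB base n d with
  | case1 n d h => omega
  | case2 n d h ih => omega

theorem pvCountB_lt (base n : Int) (h : n < base) : pvCountB base n 1 = 1 := by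
  rw [pvCountB.eq_def, dif_pos (Or.inl h)]

theorem pvCountB_step (base n : Int) (hb2 : 2 ≤ base) (h : base ≤ n) :
    pvCountB base n 1 = pvCountB base (PySem.Int.floordiv n base) 1 + 1 := by
  rw [pvCountB.eq_def, dif_neg (by omega)]
  exact pvCountB_succ base _ 1

-- the quotient n // base is at least 1 and strictly smaller than n when base ≤ n, 2 ≤ base
theorem pv_quot_facts (base n : Int) (hb2 : 2 ≤ base) (hn : base ≤ n) :
    1 ≤ PySem.Int.floordiv n base ∧ PySem.Int.floordiv n base < n := by
  have hb : 0 < base := by omega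
  have hr0 : 0 ≤ PySem.Int.mod n base := PySem.Int.mod_nonneg n hb
  have heq := PySem.Int.floordiv_mul_add_mod n base
  have hq1 : 1 ≤ PySem.Int.floordiv n base := by
    rw [PySem.Int.le_floordiv_iff_mul_le hb]; omega
  have h2q : PySem.Int.floordiv n base * 2 ≤ PySem.Int.floordiv n base * base :=
    mul_le_mul_of_nonneg_left hb2 (by omega)
  exact ⟨hq1, by omega⟩

theorem pvLoopA_eq : ∀ (k : Nat) (cl : List Char) (base N : Int), N.toNat = k →
    1 ≤ base → (2 ≤ base ∨ N ≤ 0) → ∀ (acc : List Char),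
    pvLoopA cl base N acc =
      ((List.range (pvCountB base N 1).toNat).map (pvG cl base N)).reverse ++ acc := by
  intro k
  induction k using Nat.strong_induction_on with
  | _ k ih =>
    intro cl base N hk hb1 hcase acc
    have hb : 0 < base := by omega
    by_cases hlt : N < base
    · have hguard : PySem.Int.floordiv N base ≤ 0 ∨ base ≤ 1 := by
        by_cases hb2 : 2 ≤ base
        · left
          rw [PySem.Int.floordiv_eq_ediv_of_pos hb]
          by_cases h0 : 0 ≤ N
          · rw [Int.ediv_eq_zero_of_lt h0 hlt]
          · exact le_of_lt (Int.ediv_neg_of_neg_of_pos (by omega) (by omega))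
        · right; omega
      rw [pvLoopA, pv_sub_mod_div base N hb, dif_pos hguard]
      rw [pvCountB_lt base N hlt]
      show _ = ((List.range 1).map (pvG cl base N)).reverse ++ acc
      rw [List.range_one, List.map_singleton, List.reverse_singleton]
      unfold pvG
      rw [pow_zero, pv_floordiv_one]
      rfl
    · push_neg at hlt
      have hb2 : 2 ≤ base := by rcases hcase with h | h <;> omega
      obtain ⟨hq1, hqlt⟩ := pv_quot_facts base N hb2 hlt
      rw [pvLoopA, pv_sub_mod_div base N hb, dif_neg (by omega)]
      rw [ih (PySem.Int.floordiv N base).toNat (by omega) cl base _ rfl (by omega)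
        (Or.inl hb2)]
      rw [pvCountB_step base N hb2 hlt]
      have hm1 := pvCountB_ge base (PySem.Int.floordiv N base) 1
      have htn : (pvCountB base (PySem.Int.floordiv N base) 1 + 1).toNat =
          (pvCountB base (PySem.Int.floordiv N base) 1).toNat + 1 := by omega
      rw [htn, List.range_succ_eq_map, List.map_cons, List.map_map, List.reverse_cons,
        List.append_assoc]
      congr 1
      · apply congrArg
        apply List.map_congr_left
        intro e _
        show pvG cl base (PySem.Int.floordiv N base) e = pvG cl base N (e + 1)
        unfold pvG
        rw [pv_div_pow base N e hb]
      · unfold pvG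
        rw [pow_zero, pv_floordiv_one]
        rfl

theorem pv_foldl_prepend {α : Type} (l : List α) (c : Char) (acc : List Char) :
    l.foldl (fun acc _ => c :: acc) acc = List.replicate l.length c ++ acc := by
  induction l generalizing acc with
  | nil => rfl
  | cons x xs ihx =>
    rw [List.foldl_cons, ihx, List.length_cons, List.replicate_succ', List.append_assoc]
    rfl

theorem pv_msb_rev (g : Nat → Char) : ∀ m,
    (List.range m).map (fun k => g (m - 1 - k)) = ((List.range m).map g).reverse := by
  intro m
  induction m with
  | zero => rfl
  | succ m ihm =>
    conv_lhs => rw [List.range_succ_eq_map]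
    conv_rhs => rw [List.range_succ]
    rw [List.map_cons, List.map_map, List.map_append, List.map_singleton,
      List.reverse_append, List.reverse_singleton, List.singleton_append]
    have h1 : ((fun k => g (m + 1 - 1 - k)) ∘ Nat.succ) = fun k => g (m - 1 - k) := by
      funext k
      simp only [Function.comp_apply]
      congr 1
      omega
    have h2 : m + 1 - 1 - 0 = m := by omega
    rw [h1, h2, ihm]

-- the fill loop started at pw = base^j produces the digit characters at exponents j, …, 0
theorem pv_fillB (cl : List Char) (base number : Int) (hb : 0 < base) :
    ∀ (l : List Int) (j : Nat) (acc : List Char), l.length = j + 1 →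
      (l.foldl (pvFillStep cl base number) ((base ^ j : Int), acc)).2 =
        acc ++ (List.range (j + 1)).map (fun k => pvG cl base number (j - k)) := by
  intro l
  induction l with
  | nil => intro j acc h; simp at h
  | cons x xs ihx =>
    intro j acc h
    rw [List.foldl_cons]
    cases j with
    | zero =>
      have hx : xs = [] := List.eq_nil_of_length_eq_zero (by simpa using h)
      subst hx
      simp [pvFillStep, pvG, List.range_one]
    | succ j' =>
      have hx : xs.length = j' + 1 := by simpa using h
      have hpow : PySem.Int.floordiv ((base : Int) ^ (j' + 1)) base = base ^ j' := by
        rw [PySem.Int.floordiv_eq_ediv_of_pos hb, pow_succ, Int.mul_ediv_cancel _ (by omega)]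
      rw [show pvFillStep cl base number ((base : Int) ^ (j' + 1), acc) x =
          ((base : Int) ^ j', acc ++ [pvG cl base number (j' + 1)]) from by
        simp [pvFillStep, pvG, hpow]]
      rw [ihx j' _ hx]
      conv_rhs => rw [List.range_succ_eq_map]
      rw [List.map_cons, List.map_map, List.append_assoc, List.singleton_append]
      have hA : pvG cl base number (j' + 1 - 0) = pvG cl base number (j' + 1) := by norm_num
      have hrest : (List.range (j' + 1)).map ((fun k => pvG cl base number (j' + 1 - k)) ∘ Nat.succ)
          = (List.range (j' + 1)).map (fun k => pvG cl base number (j' - k)) := by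
        apply List.map_congr_left
        intro k _
        simp only [Function.comp_apply]
        congr 1
        omega
      rw [hA, hrest]

theorem number_to_hint_str_py_spec_aux (number : Int) (chars : String) (digits : Int)
    (hb1 : 1 ≤ PySem.Str.len chars) (hcase : 2 ≤ PySem.Str.len chars ∨ number ≤ 0) :
    number_to_hint_str_py number chars digits = number_to_hint_str_py_alt number chars digits := by
  simp only [number_to_hint_str_py, number_to_hint_str_py_alt]
  set cl := chars.toList with hcl
  set base := PySem.Str.len chars with hbase
  have hb : 0 < base := by omega
  set nd := pvCountB base number 1 with hnd
  have hnd1 : 1 ≤ nd := pvCountB_ge base number 1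
  set m := nd.toNat with hm
  have hmnd : (m : Int) = nd := by omega
  -- A's digit loop, then its padding loop
  rw [pvLoopA_eq number.toNat cl base number rfl hb1 hcase []]
  rw [← hnd, ← hm]
  rw [List.append_nil]
  have hlen : (((List.range m).map (pvG cl base number)).reverse).length = m := by simp
  rw [hlen, pv_foldl_prepend, PySem.List.length_pyRange_one]
  -- B's fill pass
  rw [show (nd - 1).toNat = m - 1 by omega]
  rw [pv_fillB cl base number hb (PySem.List.pyRange 0 nd 1) (m - 1)
    (List.replicate (max nd digits - nd).toNat (PySem.List.pyGetD cl 0 ' '))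
    (by rw [PySem.List.length_pyRange_one]; omega)]
  rw [show (m - 1) + 1 = m by omega, pv_msb_rev (pvG cl base number) m]
  rw [show (max nd digits - nd).toNat = (digits - (m : Int) - 0).toNat by omega]

-- ===== VERDICT (by name: the statement is the Claim_ definition above) =====
theorem number_to_hint_str_py_spec : Claim_equal_number_to_hint_str_py := by
  intro number chars digits _ hpre
  exact number_to_hint_str_py_spec_aux number chars digits hpre.1 hpre.2
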